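-- pv_equiv track=rewrite | github.com/itorisaias/interfatecs | interfatecs/2024/Fase 2/codigo/coisadecalouro.py | obter_dias_totais
-- ===== SOURCE A (Python) =====
-- def obter_dias_totais(dia, mes, meses):
--     total_dias = 0
--     for mes_curto, dias, mes_extenso  in meses:
--         if mes == mes_extenso:
--             total_dias += dia
--             return total_dias
--         total_dias += dias
--     return -1
-- ===== SOURCE B (Python) =====
-- def obter_dias_totais(dia, mes, meses):
--     pos = {}
--     running = 0
--     for _mes_curto, dias, mes_extenso in meses:
--         if mes_extenso not in pos:
--             pos[mes_extenso] = running
--         running += dias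
--     if mes in pos:
--         return pos[mes] + dia
--     return -1
-- ===== Notes on version B (the rewrite author's own statement) =====
-- stated objective: alternative
-- what changed: Replaces A's early-returning accumulating scan with a one-pass prefix-sum lookup table (first occurrence wins) followed by a single dict lookup.
import Mathlib
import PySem

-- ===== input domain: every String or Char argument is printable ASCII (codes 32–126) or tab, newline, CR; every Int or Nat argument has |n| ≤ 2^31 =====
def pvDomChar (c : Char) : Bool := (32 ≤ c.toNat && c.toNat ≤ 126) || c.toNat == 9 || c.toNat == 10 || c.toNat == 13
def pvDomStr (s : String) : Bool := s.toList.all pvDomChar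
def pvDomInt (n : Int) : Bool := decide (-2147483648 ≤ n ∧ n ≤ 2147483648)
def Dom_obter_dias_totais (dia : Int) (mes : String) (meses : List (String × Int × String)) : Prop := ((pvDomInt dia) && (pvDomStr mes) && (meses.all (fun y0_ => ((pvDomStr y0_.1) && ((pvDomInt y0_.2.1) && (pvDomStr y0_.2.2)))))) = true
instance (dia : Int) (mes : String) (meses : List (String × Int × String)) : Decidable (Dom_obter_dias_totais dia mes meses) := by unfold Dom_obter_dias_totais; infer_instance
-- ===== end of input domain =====

-- B replaces A's early-returning accumulating scan by a prefix-sum lookup table built in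
-- one pass (first occurrence of a month name wins) followed by a single dict lookup
-- (objective: alternative).

-- ===== PORT A =====
-- the for-loop of A: scans meses carrying total_dias, returning early on a name match
def obterA (dia : Int) (mes : String) : List (String × Int × String) → Int → Int
  | [], _ => -1
  | (_, dias, mes_extenso) :: rest, total_dias =>
    if mes = mes_extenso then total_dias + dia
    else obterA dia mes rest (total_dias + dias)

def obter_dias_totais (dia : Int) (mes : String) (meses : List (String × Int × String)) : Int :=
  obterA dia mes meses 0

-- ===== PORT B =====
-- one fold building (pos, running): pos maps each first-seen month name to the days before it
def obterBStep (st : PySem.Dict String Int × Int) (t : String × Int × String) :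
    PySem.Dict String Int × Int :=
  let pos := if st.1.contains t.2.2 then st.1 else st.1.insert t.2.2 st.2
  (pos, st.2 + t.2.1)

def obter_dias_totais_alt (dia : Int) (mes : String) (meses : List (String × Int × String)) : Int :=
  let st := meses.foldl obterBStep (PySem.Dict.empty, 0)
  match st.1.get? mes with
  | some p => p + dia
  | none => -1

-- ===== PRECONDITION & SPEC =====
def Spec_obter_dias_totais (dia : Int) (mes : String) (meses : List (String × Int × String)) (out : Int) : Prop := out = obter_dias_totais_alt dia mes meses
instance (dia : Int) (mes : String) (meses : List (String × Int × String)) (out : Int) : Decidable (Spec_obter_dias_totais dia mes meses out) := by unfold Spec_obter_dias_totais; infer_instance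

-- ===== CLAIM (what is proved, stated in full; the proofs are below) =====
def Claim_equal_obter_dias_totais : Prop := ∀ (dia : Int) (mes : String) (meses : List (String × Int × String)), Dom_obter_dias_totais dia mes meses → Spec_obter_dias_totais dia mes meses (obter_dias_totais dia mes meses)

-- ===== LEMMAS AND PROOFS =====

-- loop invariant: if mes is not yet in the table, A's scan from accumulator t equals
-- (days recorded for mes in the finished table, relative to the current running total r) + dia
theorem obterA_eq_lookup (dia : Int) (mes : String) :
    ∀ (meses : List (String × Int × String)) (d : PySem.Dict String Int) (r t : Int),
      d.get? mes = none →
      obterA dia mes meses t =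
        match (meses.foldl obterBStep (d, r)).1.get? mes with
        | some p => t + (p - r) + dia
        | none => -1 := by
  intro meses
  induction meses with
  | nil => intro d r t h; simp [obterA, h]
  | cons hd rest ih =>
    intro d r t h
    obtain ⟨mc, dias, me⟩ := hd
    by_cases hm : mes = me
    · subst hm
      have hc : d.contains mes = false := by
        rw [PySem.Dict.contains_eq_isSome_get?, h]; rfl
      have hkey : ∀ (l : List (String × Int × String)) (d' : PySem.Dict String Int) (r' : Int),
          d'.get? mes = some r →
          (l.foldl obterBStep (d', r')).1.get? mes = some r := by
        intro l
        induction l with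
        | nil => intro d' r' h'; exact h'
        | cons x xs ihx =>
          intro d' r' h'
          simp only [List.foldl_cons, obterBStep]
          apply ihx
          by_cases hcx : d'.contains x.2.2
          · simp [hcx, h']
          · by_cases hx : mes = x.2.2
            · exfalso
              rw [PySem.Dict.contains_eq_isSome_get?, ← hx, h'] at hcx
              simp at hcx
            · simp only [hcx, Bool.false_eq_true, if_false]
              rw [PySem.Dict.get?_insert_of_ne d' r' hx, h']
      simp only [obterA, List.foldl_cons, obterBStep, hc, Bool.false_eq_true,
        if_false, if_pos trivial]
      rw [hkey rest _ _ (PySem.Dict.get?_insert_self d mes r)]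
      ring_nf
    · simp only [obterA, if_neg hm, List.foldl_cons, obterBStep]
      have h' : (if d.contains me then d else d.insert me r).get? mes = none := by
        by_cases hc : d.contains me
        · simp [hc, h]
        · simp only [hc, Bool.false_eq_true, if_false]
          rw [PySem.Dict.get?_insert_of_ne d r hm, h]
      rw [ih _ (r + dias) (t + dias) h']
      cases hres : ((rest.foldl obterBStep
          ((if d.contains me then d else d.insert me r), r + dias)).1.get? mes) with
      | none => simp
      | some p => simp only []; ring_nf

-- ===== VERDICT (by name: the statement is the Claim_ definition above) =====
theorem obter_dias_totais_spec : Claim_equal_obter_dias_totais := by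
  intro dia mes meses _
  unfold Spec_obter_dias_totais obter_dias_totais obter_dias_totais_alt
  rw [obterA_eq_lookup dia mes meses PySem.Dict.empty 0 0 (PySem.Dict.get?_empty mes)]
  show _ = (match (meses.foldl obterBStep (PySem.Dict.empty, 0)).1.get? mes with
    | some p => p + dia | none => -1)
  cases (meses.foldl obterBStep (PySem.Dict.empty, 0)).1.get? mes with
  | none => rfl
  | some p => show 0 + (p - 0) + dia = p + dia; ring
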